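-- pv_equiv track=rewrite | github.com/Integrador2025-2/Proyecto-Integrador | RAG-Service/services/cotizacion_service.py | _agrupar_por_actividad
-- ===== SOURCE A (Python) =====
-- from typing import Dict, Any, List, Optional
--
-- def _agrupar_por_actividad(items: List[Dict[str, Any]]) -> Dict[str, List[Dict[str, Any]]]:
--     """
--     Agrupar ítems por actividad.
--
--     Si hay una columna "ACTIVIDAD" explícita, agrupa por su valor.
--     Si no, agrupa todos los ítems en una sola actividad "General".
--     """
--     agrupados = {}
--
--     for item in items:
--         actividad = item.get("actividad", "General")
--
--         # Normalizar nombre de actividad (usar como clave de agrupación)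
--         # Si la actividad es muy específica (parece un ítem), agrupar en "General"
--         if len(actividad) < 10 or any(char.isdigit() for char in actividad[:5]):
--             # Parece ser un ítem específico, no una actividad
--             actividad_grupo = "General"
--         else:
--             actividad_grupo = actividad
--
--         if actividad_grupo not in agrupados:
--             agrupados[actividad_grupo] = []
--
--         agrupados[actividad_grupo].append(item)
--
--     return agrupados
-- ===== SOURCE B (Python) =====
-- def _agrupar_por_actividad(items):
--     def clave(item):
--         actividad = item.get("actividad", "General")
--         if len(actividad) < 10 or any(c.isdigit() for c in actividad[:5]):
--             return "General"
--         return actividad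
--
--     claves = [clave(item) for item in items]
--     return {k: [item for item, c in zip(items, claves) if c == k]
--             for k in dict.fromkeys(claves)}
-- ===== Notes on version B (the rewrite author's own statement) =====
-- stated objective: simpler
-- what changed: Replaces the incremental dict-building loop (membership test, insert-empty, append) by a two-pass comprehension: compute each item's group key once, then build the dict in one comprehension mapping each first-occurrence-deduplicated key to the filtered items.
import Mathlib
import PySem

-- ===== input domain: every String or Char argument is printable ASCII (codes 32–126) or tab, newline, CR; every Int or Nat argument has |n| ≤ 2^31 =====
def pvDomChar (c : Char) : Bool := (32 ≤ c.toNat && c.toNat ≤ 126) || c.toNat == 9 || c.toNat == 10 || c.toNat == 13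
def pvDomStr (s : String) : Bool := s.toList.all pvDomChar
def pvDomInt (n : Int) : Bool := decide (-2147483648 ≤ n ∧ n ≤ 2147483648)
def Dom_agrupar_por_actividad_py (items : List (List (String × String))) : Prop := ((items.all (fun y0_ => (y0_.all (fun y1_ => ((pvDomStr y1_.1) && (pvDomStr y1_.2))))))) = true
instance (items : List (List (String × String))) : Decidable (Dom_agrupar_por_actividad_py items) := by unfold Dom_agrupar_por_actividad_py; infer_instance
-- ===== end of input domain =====

-- B replaces A's incremental dict-building loop by a two-pass comprehension (keys once, then one
-- group-comprehension per distinct key); objective: simpler, not faster. Equivalence is about the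
-- return value; neither version mutates its argument.

-- ===== PORT A =====
def agrupar_por_actividad_py (items : List (List (String × String))) : List (String × List (List (String × String))) :=
  (items.foldl (fun (agrupados : PySem.Dict String (List (List (String × String)))) item =>
      let actividad := (PySem.Dict.mk item).getD "actividad" "General"
      let actividad_grupo :=
        if decide (PySem.Str.len actividad < 10)
            || (PySem.Chars.slice actividad.toList none (some 5)).any PySem.Chars.isdigit
        then "General" else actividad
      let d1 := if agrupados.contains actividad_grupo then agrupados
                else agrupados.insert actividad_grupo []
      d1.insert actividad_grupo (d1.getD actividad_grupo [] ++ [item]))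
    PySem.Dict.empty).items

-- ===== PORT B =====
-- the helper 'clave' of Source B
def clave (item : List (String × String)) : String :=
  let actividad := (PySem.Dict.mk item).getD "actividad" "General"
  if decide (PySem.Str.len actividad < 10)
      || (PySem.Chars.slice actividad.toList none (some 5)).any PySem.Chars.isdigit
  then "General" else actividad

def agrupar_por_actividad_py_alt (items : List (List (String × String))) : List (String × List (List (String × String))) :=
  let claves := items.map clave
  (PySem.List.dedup claves).map (fun k =>
    (k, ((items.zip claves).filter (fun p => p.2 == k)).map (·.1)))

-- ===== PRECONDITION & SPEC =====
def Spec_agrupar_por_actividad_py (items : List (List (String × String))) (out : List (String × List (List (String × String)))) : Prop := out = agrupar_por_actividad_py_alt items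
instance (items : List (List (String × String))) (out : List (String × List (List (String × String)))) : Decidable (Spec_agrupar_por_actividad_py items out) := by unfold Spec_agrupar_por_actividad_py; infer_instance

-- ===== CLAIM (what is proved, stated in full; the proofs are below) =====
def Claim_equal_agrupar_por_actividad_py : Prop := ∀ (items : List (List (String × String))), Dom_agrupar_por_actividad_py items → Spec_agrupar_por_actividad_py items (agrupar_por_actividad_py items)

-- ===== LEMMAS AND PROOFS =====

-- A's loop body (membership test, insert-empty, lookup-append-insert) is one Python-dict 'modify'.
theorem stepA_eq_modify (d : PySem.Dict String (List (List (String × String)))) (item : List (String × String)) :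
    (let d1 := if d.contains (clave item) then d else d.insert (clave item) [];
     d1.insert (clave item) (d1.getD (clave item) [] ++ [item]))
      = d.modify (clave item) [] (· ++ [item]) := by
  by_cases h : d.contains (clave item)
  · simp only [h, if_true]
    rfl
  · have h' : d.contains (clave item) = false := by simpa using h
    simp only [h', Bool.false_eq_true, if_false]
    rw [PySem.Dict.getD_insert_self, PySem.Dict.insert_insert_self,
       show (d.modify (clave item) [] (· ++ [item]))
          = d.insert (clave item) (d.getD (clave item) [] ++ [item]) from rfl,
       PySem.Dict.getD_of_not_contains d [] h']

theorem agrupar_eq (items : List (List (String × String))) :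
    agrupar_por_actividad_py items = agrupar_por_actividad_py_alt items := by
  unfold agrupar_por_actividad_py agrupar_por_actividad_py_alt
  have hbody : (items.foldl (fun (agrupados : PySem.Dict String (List (List (String × String)))) item =>
      let actividad := (PySem.Dict.mk item).getD "actividad" "General"
      let actividad_grupo :=
        if decide (PySem.Str.len actividad < 10)
            || (PySem.Chars.slice actividad.toList none (some 5)).any PySem.Chars.isdigit
        then "General" else actividad
      let d1 := if agrupados.contains actividad_grupo then agrupados
                else agrupados.insert actividad_grupo []
      d1.insert actividad_grupo (d1.getD actividad_grupo [] ++ [item]))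
    PySem.Dict.empty)
      = ((items.map (fun it => (clave it, it))).foldl
          (fun d p => d.modify p.1 [] (· ++ [p.2])) PySem.Dict.empty) := by
    rw [List.foldl_map]
    have hfun : (fun (agrupados : PySem.Dict String (List (List (String × String)))) item =>
        let actividad := (PySem.Dict.mk item).getD "actividad" "General"
        let actividad_grupo :=
          if decide (PySem.Str.len actividad < 10)
              || (PySem.Chars.slice actividad.toList none (some 5)).any PySem.Chars.isdigit
          then "General" else actividad
        let d1 := if agrupados.contains actividad_grupo then agrupados
                  else agrupados.insert actividad_grupo []
        d1.insert actividad_grupo (d1.getD actividad_grupo [] ++ [item]))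
        = (fun (d : PySem.Dict String (List (List (String × String)))) item =>
            d.modify (clave item) [] (· ++ [item])) := by
      funext d item
      exact stepA_eq_modify d item
    rw [hfun]
  rw [hbody]
  set L := items.map (fun it => (clave it, it)) with hL
  have hnodup : ((L.foldl (fun d p => d.modify p.1 [] (· ++ [p.2])) PySem.Dict.empty)).keys.Nodup :=
    PySem.Dict.nodup_keys_foldl_modify_key L (·.1) [] (fun _ p v => v ++ [p.2]) _ PySem.Dict.nodup_keys_empty
  rw [PySem.Dict.items_eq_map_keys _ hnodup []]
  have hkeys : ((L.foldl (fun d p => d.modify p.1 [] (· ++ [p.2])) PySem.Dict.empty)).keys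
      = PySem.List.dedup (items.map clave) := by
    rw [PySem.Dict.keys_foldl_modify_key L (·.1) [] (fun _ p v => v ++ [p.2])]
    rw [PySem.Dict.keys_empty, PySem.Set.update_nil_left, hL, List.map_map]
    rfl
  rw [hkeys]
  refine List.map_congr_left (fun k _ => ?_)
  rw [PySem.Dict.getD_foldl_modify_append L PySem.Dict.empty k, PySem.Dict.getD_empty]
  have hzip : items.zip (items.map clave) = items.map (fun it => (it, clave it)) := by
    have := @List.zip_map' _ _ _ id clave items
    simpa using this
  rw [hzip, hL]
  simp only [List.filter_map, List.map_map]
  rfl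

-- ===== VERDICT (by name: the statement is the Claim_ definition above) =====
theorem agrupar_por_actividad_py_spec : Claim_equal_agrupar_por_actividad_py := by
  intro items _
  unfold Spec_agrupar_por_actividad_py
  exact agrupar_eq items
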